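-- pv_equiv track=rewrite | github.com/laingyulee/e-paper-1.54-micropython | chinese/il0373_cn.py | _bmf_byte_to_bit
-- ===== SOURCE A (Python) =====
-- from math import ceil
--
-- def _bmf_byte_to_bit(byte_arr, font_size):
--     """
--     将 BMF 字体文件中读取的字节数组转换为 2D 位图数组 (font_size x font_size)。
--     假设 BMF 字体数据是按行存储的，每行填充到最近的8位字节。
--     例如，12x12 字体，每行12像素，需要2个字节来存储 (2*8=16位)。
--     """
--     if not byte_arr:
--         return [[0 for _ in range(font_size)] for _ in range(font_size)] # Return empty bitmap
--
--     bitmap_2d = []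
--     bytes_per_row = ceil(font_size / 8) # 每行需要的字节数 (例如 12px -> 2 bytes)
--
--     for r_idx in range(font_size): # 遍历每一行
--         row_bits = []
--         # 从 byte_arr 中取出当前行对应的字节
--         # 假设 byte_arr 是连续的，总长度为 bytes_per_row * font_size
--         start_byte_idx = r_idx * bytes_per_row
--
--         for b_idx in range(bytes_per_row): # 遍历当前行的每个字节
--             if start_byte_idx + b_idx < len(byte_arr):
--                 current_byte = byte_arr[start_byte_idx + b_idx]
--             else:
--                 current_byte = 0 # Prevent IndexError if byte_arr is too short
--
--             for i in range(7, -1, -1): # 从最高位开始，提取每个像素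
--                 if len(row_bits) < font_size: # 确保只提取 font_size 个像素
--                     row_bits.append((current_byte >> i) & 1)
--                 else:
--                     break # Current row is full
--         bitmap_2d.append(row_bits)
--
--     # Pad rows if they are shorter than font_size (shouldn't happen if logic is correct)
--     for row in bitmap_2d:
--         while len(row) < font_size:
--             row.append(0)
--
--     # Pad with empty rows if bitmap_2d has fewer than font_size rows
--     while len(bitmap_2d) < font_size:
--         bitmap_2d.append([0 for _ in range(font_size)])
--
--     return bitmap_2d
-- ===== SOURCE B (Python) =====
-- from math import ceil
--
-- def _bmf_byte_to_bit(byte_arr, font_size):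
--     """Compute each pixel directly from its (row, column) coordinate."""
--     bytes_per_row = ceil(font_size / 8)
--     L = len(byte_arr)
--     return [[((byte_arr[i] if (i := r * bytes_per_row + c // 8) < L else 0)
--               >> (7 - c % 8)) & 1
--              for c in range(font_size)]
--             for r in range(font_size)]
-- ===== Notes on version B (the rewrite author's own statement) =====
-- stated objective: simpler
-- what changed: Replaces A's byte-then-bit fill loops with length guards and three padding passes by a direct per-coordinate formula: pixel (r,c) is bit 7-c%8 of byte r*bytes_per_row + c//8 (0 when out of range), built as one nested comprehension with no padding or special empty-array case.
import Mathlib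
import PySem

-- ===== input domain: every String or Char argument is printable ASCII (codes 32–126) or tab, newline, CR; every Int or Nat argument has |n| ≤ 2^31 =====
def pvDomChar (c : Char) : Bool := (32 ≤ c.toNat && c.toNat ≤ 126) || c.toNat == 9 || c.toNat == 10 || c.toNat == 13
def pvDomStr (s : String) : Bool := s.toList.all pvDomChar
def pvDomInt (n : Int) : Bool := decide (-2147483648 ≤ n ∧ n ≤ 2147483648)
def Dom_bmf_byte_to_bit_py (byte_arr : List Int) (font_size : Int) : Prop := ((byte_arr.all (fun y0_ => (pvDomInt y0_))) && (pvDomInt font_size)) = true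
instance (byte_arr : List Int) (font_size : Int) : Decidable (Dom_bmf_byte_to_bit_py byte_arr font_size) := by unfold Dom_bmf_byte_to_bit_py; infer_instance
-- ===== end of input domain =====

-- B replaces A's byte-then-bit fill loops (with length guards and three padding passes) by a direct
-- per-coordinate bit formula in one nested comprehension; objective: simpler, same return value.

-- ===== PORT A =====
-- while len(row) < font_size: row.append(0)   (terminates: length grows each step)
def pvPadRow (row : List Int) (fs : Int) : List Int :=
  if (row.length : Int) < fs then pvPadRow (row ++ [0]) fs else row
termination_by (fs - row.length).toNat
decreasing_by simp; omega

-- while len(bitmap_2d) < font_size: bitmap_2d.append([0]*font_size)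
def pvPadRows (bm : List (List Int)) (fs : Int) : List (List Int) :=
  if (bm.length : Int) < fs then
    pvPadRows (bm ++ [(PySem.List.pyRange 0 fs 1).map (fun _ => (0 : Int))]) fs
  else bm
termination_by (fs - bm.length).toNat
decreasing_by simp; omega

-- literal port of A; ceil(font_size / 8) = -((-font_size) // 8), exact since |font_size| ≤ 2^31 (float division exact there);
-- byte_arr[i] ported as pyGetD (guard 'i < len(byte_arr)' ensures the index is in range, so it is exact);
-- (x >> i) & 1 ported as band (pvShift x i.toNat) 1 (i ranges over 7..0, so .toNat is exact)
-- Python's x >> k for k ≥ 0 (arithmetic shift; shared bit primitive of both ports)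
def pvShift (x : Int) (k : Nat) : Int := x >>> k
def bmf_byte_to_bit_py (byte_arr : List Int) (font_size : Int) : List (List Int) :=
  if byte_arr = [] then
    (PySem.List.pyRange 0 font_size 1).map (fun _ =>
      (PySem.List.pyRange 0 font_size 1).map (fun _ => (0 : Int)))
  else
    let bytes_per_row : Int := -(PySem.Int.floordiv (-font_size) 8)
    let bitmap_2d :=
      (PySem.List.pyRange 0 font_size 1).foldl (fun bm r_idx =>
        let start_byte_idx := r_idx * bytes_per_row
        let row_bits :=
          (PySem.List.pyRange 0 bytes_per_row 1).foldl (fun row b_idx =>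
            let current_byte : Int :=
              if start_byte_idx + b_idx < (byte_arr.length : Int) then
                PySem.List.pyGetD byte_arr (start_byte_idx + b_idx) 0
              else 0
            (PySem.List.pyRange 7 (-1) (-1)).foldl (fun row i =>
              if (row.length : Int) < font_size then
                row ++ [PySem.Int.band (pvShift current_byte i.toNat) 1]
              else row) row) []
        bm ++ [row_bits]) []
    let bitmap_2d := bitmap_2d.map (fun row => pvPadRow row font_size)
    pvPadRows bitmap_2d font_size

-- ===== PORT B =====
-- pixel(r, c) of Source B; same PySem conventions as A's port
def pvPixel (byte_arr : List Int) (bytes_per_row r c : Int) : Int :=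
  let idx := r * bytes_per_row + PySem.Int.floordiv c 8
  let byte : Int := if idx < (byte_arr.length : Int) then PySem.List.pyGetD byte_arr idx 0 else 0
  PySem.Int.band (pvShift byte (7 - PySem.Int.mod c 8).toNat) 1

def bmf_byte_to_bit_py_alt (byte_arr : List Int) (font_size : Int) : List (List Int) :=
  let bytes_per_row : Int := -(PySem.Int.floordiv (-font_size) 8)
  (PySem.List.pyRange 0 font_size 1).map (fun r =>
    (PySem.List.pyRange 0 font_size 1).map (fun c => pvPixel byte_arr bytes_per_row r c))

-- ===== PRECONDITION & SPEC =====
def Spec_bmf_byte_to_bit_py (byte_arr : List Int) (font_size : Int) (out : List (List Int)) : Prop := out = bmf_byte_to_bit_py_alt byte_arr font_size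
instance (byte_arr : List Int) (font_size : Int) (out : List (List Int)) : Decidable (Spec_bmf_byte_to_bit_py byte_arr font_size out) := by unfold Spec_bmf_byte_to_bit_py; infer_instance

-- ===== CLAIM (what is proved, stated in full; the proofs are below) =====
def Claim_equal_bmf_byte_to_bit_py : Prop := ∀ (byte_arr : List Int) (font_size : Int), Dom_bmf_byte_to_bit_py byte_arr font_size → Spec_bmf_byte_to_bit_py byte_arr font_size (bmf_byte_to_bit_py byte_arr font_size)

-- ===== LEMMAS AND PROOFS =====

-- A's guarded bit-append loop keeps appending f i until the row reaches length fs
theorem pv_guarded_foldl (f : Int → Int) (l : List Int) (fs : Int) :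
    ∀ row : List Int,
      l.foldl (fun row i => if (row.length : Int) < fs then row ++ [f i] else row) row
      = row ++ ((l.take (fs - row.length).toNat).map f) := by
  induction l with
  | nil => intro row; simp
  | cons a l ih =>
    intro row
    by_cases h : (row.length : Int) < fs
    · have ht : (fs - (row.length : Int)).toNat = (fs - ((row.length : Int) + 1)).toNat + 1 := by omega
      simp only [List.foldl_cons, if_pos h, ih]
      rw [ht, List.take_succ_cons]
      simp
    · have ht : (fs - (row.length : Int)).toNat = 0 := by omega
      simp only [List.foldl_cons, if_neg h, ih, ht]
      simp

theorem pv_range7 : PySem.List.pyRange 7 (-1) (-1) = [7, 6, 5, 4, 3, 2, 1, 0] := by decide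

theorem pv_take_bits (f : Int → Int) (s : Nat) :
    (([7, 6, 5, 4, 3, 2, 1, 0] : List Int).take s).map f
      = (List.range (min s 8)).map (fun (j : Nat) => f (7 - (j : Int))) := by
  rcases Nat.le_total s 8 with h | h
  · rw [Nat.min_eq_left h]
    interval_cases s <;> norm_num [List.range_succ]
  · rw [List.take_of_length_le (by simp [h]), Nat.min_eq_right h]
    norm_num [List.range_succ]

-- the row built by A's byte loop, after k bytes, is exactly the first min(8k, n) pixels of B's per-coordinate row
theorem pv_row_inv (byte_arr : List Int) (start : Int) (n : Nat) :
    ∀ k : Nat,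
      (PySem.List.pyRange 0 (k : Int) 1).foldl (fun row b_idx =>
        (PySem.List.pyRange 7 (-1) (-1)).foldl (fun row i =>
          if (row.length : Int) < (n : Int) then
            row ++ [PySem.Int.band (pvShift
              (if start + b_idx < (byte_arr.length : Int) then
                  PySem.List.pyGetD byte_arr (start + b_idx) 0
                else 0) i.toNat) 1]
          else row) row) []
      = (List.range (min (8 * k) n)).map (fun (c : Nat) =>
          PySem.Int.band (pvShift
            (if start + PySem.Int.floordiv (c : Int) 8 < (byte_arr.length : Int) then
                PySem.List.pyGetD byte_arr (start + PySem.Int.floordiv (c : Int) 8) 0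
              else 0) ((7 - PySem.Int.mod (c : Int) 8).toNat)) 1) := by
  intro k
  induction k with
  | zero => simp [PySem.List.pyRange_one_eq_nil]
  | succ k ih =>
    have hk1 : ((k + 1 : Nat) : Int) = (k : Int) + 1 := by push_cast; ring
    rw [hk1, PySem.List.pyRange_one_succ_right (by positivity), List.foldl_append,
        List.foldl_cons, List.foldl_nil, ih, pv_range7, pv_guarded_foldl]
    by_cases h8 : n ≤ 8 * k
    · have h1 : min (8 * k) n = n := by omega
      have h2 : min (8 * (k + 1)) n = n := by omega
      rw [h1, h2]
      simp
    · have h1 : min (8 * k) n = 8 * k := by omega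
      have h3 : (((n : Nat) : Int) - ((List.range (min (8 * k) n)).map (fun (c : Nat) =>
          PySem.Int.band (pvShift
            (if start + PySem.Int.floordiv (c : Int) 8 < (byte_arr.length : Int) then
                PySem.List.pyGetD byte_arr (start + PySem.Int.floordiv (c : Int) 8) 0
              else 0) ((7 - PySem.Int.mod (c : Int) 8).toNat)) 1)).length).toNat
          = n - 8 * k := by
        rw [List.length_map, List.length_range, h1]; omega
      rw [h3, pv_take_bits]
      have h2 : min (8 * (k + 1)) n = 8 * k + min (n - 8 * k) 8 := by
        rw [Nat.min_def, Nat.min_def]; split <;> split <;> omega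
      rw [h2, List.range_add, List.map_append, h1, List.map_map]
      congr 1
      apply List.map_congr_left
      intro j hj
      have hj8 : j < min (n - 8 * k) 8 := List.mem_range.mp hj
      have hj8' : j < 8 := lt_of_lt_of_le hj8 (Nat.min_le_right _ _)
      have hdiv : PySem.Int.floordiv ((8 * k + j : Nat) : Int) 8 = (k : Int) := by
        rw [PySem.Int.floordiv_eq_ediv_of_pos (by norm_num)]
        push_cast; omega
      have hmod : PySem.Int.mod ((8 * k + j : Nat) : Int) 8 = (j : Int) := by
        rw [PySem.Int.mod_eq_emod_of_pos (by norm_num)]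
        push_cast; omega
      simp only [Function.comp, hdiv, hmod]

-- pixels of the empty byte array are all 0
theorem pv_pixel_nil (bpr r c : Int) : pvPixel [] bpr r c = 0 := by
  simp only [pvPixel, List.length_nil, Nat.cast_zero]
  have hb : (if r * bpr + PySem.Int.floordiv c 8 < (0 : Int) then
      PySem.List.pyGetD ([] : List Int) (r * bpr + PySem.Int.floordiv c 8) 0 else 0) = 0 := by
    split <;> simp [PySem.List.pyGetD, PySem.List.pyGet?, PySem.List.pyIdx?]
  rw [hb]
  have hz : pvShift 0 ((7 - PySem.Int.mod c 8).toNat) = 0 := by simp [pvShift]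
  rw [hz, PySem.Int.band_one]
  decide

-- one unfolding: padding a row that is already long enough does nothing
theorem pv_padRow_eq (row : List Int) (fs : Int) (h : fs ≤ (row.length : Int)) :
    pvPadRow row fs = row := by
  rw [pvPadRow, if_neg (by omega)]

theorem pv_padRows_eq (bm : List (List Int)) (fs : Int) (h : fs ≤ (bm.length : Int)) :
    pvPadRows bm fs = bm := by
  rw [pvPadRows, if_neg (by omega)]

-- ===== VERDICT (by name: the statement is the Claim_ definition above) =====
theorem bmf_byte_to_bit_py_spec : Claim_equal_bmf_byte_to_bit_py := by
  intro byte_arr font_size _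
  unfold Spec_bmf_byte_to_bit_py bmf_byte_to_bit_py bmf_byte_to_bit_py_alt
  by_cases hfs : font_size ≤ 0
  · rw [PySem.List.pyRange_one_eq_nil (by omega)]
    by_cases hnil : byte_arr = []
    · rw [if_pos hnil]; simp
    · rw [if_neg hnil]
      simp only [List.foldl_nil, List.map_nil]
      exact pv_padRows_eq [] font_size (by simp; omega)
  · replace hfs : 0 < font_size := by omega
    by_cases hnil : byte_arr = []
    · subst hnil
      rw [if_pos rfl]
      simp only []
      apply List.map_congr_left
      intro r _
      apply List.map_congr_left
      intro c _
      exact (pv_pixel_nil _ r c).symm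
    · rw [if_neg hnil]
      simp only []
      set bpr : Int := -(PySem.Int.floordiv (-font_size) 8) with hbpr
      have hdiv : PySem.Int.floordiv (-font_size) 8 = (-font_size) / 8 :=
        PySem.Int.floordiv_eq_ediv_of_pos (by norm_num)
      have hbpr_pos : 0 < bpr := by rw [hbpr, hdiv]; omega
      have hbpr_ge : font_size ≤ 8 * bpr := by rw [hbpr, hdiv]; omega
      set n : Nat := font_size.toNat with hn
      have hfsn : font_size = (n : Int) := by omega
      set bprN : Nat := bpr.toNat with hbprN
      have hbn : bpr = (bprN : Int) := by omega
      rw [hfsn, hbn, PySem.List.foldl_append_singleton_eq_map, List.nil_append, List.map_map]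
      rw [pv_padRows_eq _ _ (by simp [PySem.List.length_pyRange_one])]
      apply List.map_congr_left
      intro r _
      simp only [Function.comp_apply]
      rw [pv_row_inv byte_arr (r * (bprN : Int)) n bprN]
      have hmin : min (8 * bprN) n = n := by omega
      rw [hmin, pv_padRow_eq _ _ (by simp)]
      rw [PySem.List.pyRange_zero_natCast, List.map_map]
      apply List.map_congr_left
      intro c _
      simp [pvPixel]
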